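-- pv_equiv track=rewrite | github.com/ctc316/algorithm-python | Lintcode/Matrix_Fast_Expo/947. Matrix Power Series.py | matrixPowerSeries
-- ===== SOURCE A (Python) =====
-- class Matrix:
--     def __init__(self, rows=0, cols=0, isUnit=False, copyFrom=None, mod=1):
--         if isinstance(copyFrom, Matrix):
--             self.rows = copyFrom.rows
--             self.cols = copyFrom.cols
--             self.matrix = [[v for v in row] for row in copyFrom]
--             self.mod = copyFrom.mod
--             return
--
--         self.rows = rows
--         self.cols = cols
--         self.matrix = [[0 for _ in range(cols)] for __ in range(rows)]
--         self.mod = mod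
--
--         if isUnit:
--             for i in range(min(rows, cols)):
--                 self.matrix[i][i] = 1
--
--
--     def multiply(self, target):
--         result = Matrix(self.rows, target.cols, mod=self.mod)
--         for i in range(self.rows):
--             for j in range(target.cols):
--                 for k in range(self.cols):
--                     result.matrix[i][j] += self.matrix[i][k] * target.matrix[k][j]
--                     result.matrix[i][j] %= self.mod
--
--         return result
--
--
--     def plus(self, target):
--         result = Matrix(self.rows, self.cols, mod=self.mod)
--         for i in range(self.rows):
--             for j in range(self.cols):
--                 result.matrix[i][j] = self.matrix[i][j] + target.matrix[i][j]
--                 result.matrix[i][j] %= self.mod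
--
--         return result
--
-- def matrixPowerSeries(A, k, m):
--     '''
--     (1)         S = A + A^2 + ... + A^k
--     (2)     S * A =     A^2 + ... + A^k + A^k+1
--     (2)-(1)   (A - 1)S = (A^k+1 - A)
--                      S = (A - 1)^-1 * (A^k+1 - A)
--     '''
--
--     rows = len(A)
--     if rows == 0:
--         return 0
--
--     cols = len(A[0])
--     if cols == 0:
--         return 0
--
--     # init A matrix
--     A_mat = Matrix(rows, cols, mod=m)
--     for i in range(rows):
--         for j in range(cols):
--             A_mat.matrix[i][j] = A[i][j]
--
--     result = Matrix(rows, cols, mod=m)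
--     cumu_mat = Matrix(rows, cols, isUnit=True, mod=m)
--
--     for _ in range(k):
--         cumu_mat = cumu_mat.multiply(A_mat)
--         result = result.plus(cumu_mat)
--
--     return result.matrix
-- ===== SOURCE B (Python) =====
-- def matrixPowerSeries(A, k, m):
--     # S = A + A^2 + ... + A^k (entries mod m), by divide and conquer:
--     #   A^(2q)   = (A^q)^2            S(2q)   = S(q) + A^q * S(q)
--     #   A^(2q+1) = (A^q)^2 * A        S(2q+1) = S(2q) + A^(2q+1)
--     n = len(A)
--     if n == 0 or len(A[0]) == 0:
--         return []
--
--     def mul(X, Y):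
--         return [[sum(X[i][t] * Y[t][j] for t in range(n)) % m for j in range(n)]
--                 for i in range(n)]
--
--     def add(X, Y):
--         return [[(X[i][j] + Y[i][j]) % m for j in range(n)] for i in range(n)]
--
--     def series(t):
--         # returns (A^t mod m, (A + ... + A^t) mod m)
--         if t <= 0:
--             return ([[1 if i == j else 0 for j in range(n)] for i in range(n)],
--                     [[0] * n for _ in range(n)])
--         P, S = series(t // 2)
--         P2 = mul(P, P)
--         S2 = add(S, mul(P, S))
--         if t % 2 == 1:
--             Pt = mul(P2, A)
--             return Pt, add(S2, Pt)
--         return P2, S2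
--
--     return series(k)[1]
-- ===== Notes on version B (the rewrite author's own statement) =====
-- stated objective: faster
-- what changed: Replaces the k-step loop (one matrix multiply and one add per step) by a divide-and-conquer recursion on k that computes A^k and the partial sum together via S(2q)=S(q)+A^q*S(q), so only O(log k) matrix operations are performed.
-- outside the precondition, e.g. on matrixPowerSeries([], 0, 1): A returns 0, B returns []; on matrixPowerSeries([[1], [2]], 1, 5): A returns [[1], [0]], B raises IndexError
import Mathlib
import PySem

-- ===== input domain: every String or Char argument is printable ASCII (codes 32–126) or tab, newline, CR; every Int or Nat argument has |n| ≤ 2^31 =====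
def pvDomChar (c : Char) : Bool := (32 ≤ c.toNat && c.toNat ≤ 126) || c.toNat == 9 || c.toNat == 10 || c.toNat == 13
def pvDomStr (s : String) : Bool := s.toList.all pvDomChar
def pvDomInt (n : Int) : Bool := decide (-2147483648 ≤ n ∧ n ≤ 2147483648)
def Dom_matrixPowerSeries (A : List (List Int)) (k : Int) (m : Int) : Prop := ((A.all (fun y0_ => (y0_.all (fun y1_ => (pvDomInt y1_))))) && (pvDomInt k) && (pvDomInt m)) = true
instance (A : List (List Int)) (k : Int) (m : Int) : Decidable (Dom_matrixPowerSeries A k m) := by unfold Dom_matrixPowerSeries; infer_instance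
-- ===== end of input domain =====

-- B replaces A's k-step loop by a divide-and-conquer recursion on k computing A^t and the
-- partial sum together (O(log k) matrix operations instead of k).

-- ===== PORT A =====
-- Matrix.multiply: triple loop, result[i][j] += self[i][k]*target[k][j]; result[i][j] %= m each step
def pyMulA (m : Int) (X Y : List (List Int)) (srows scols tcols : Nat) : List (List Int) :=
  (List.range srows).map (fun i => (List.range tcols).map (fun j =>
    (List.range scols).foldl
      (fun acc t => PySem.Int.mod (acc + (X.getD i []).getD t 0 * (Y.getD t []).getD j 0) m) 0))

-- Matrix.plus: result[i][j] = self[i][j] + target[i][j]; result[i][j] %= m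
def pyPlusA (m : Int) (X Y : List (List Int)) (rows cols : Nat) : List (List Int) :=
  (List.range rows).map (fun i => (List.range cols).map (fun j =>
    PySem.Int.mod ((X.getD i []).getD j 0 + (Y.getD i []).getD j 0) m))

def matrixPowerSeries (A : List (List Int)) (k : Int) (m : Int) : List (List Int) :=
  let rows := A.length
  if rows = 0 then []   -- Python returns the int 0 here (not a matrix); excluded by Pre_
  else
    let cols := (A.getD 0 []).length
    if cols = 0 then [] -- Python returns the int 0 here (not a matrix); excluded by Pre_
    else
      let Amat := (List.range rows).map (fun i => (List.range cols).map (fun j => (A.getD i []).getD j 0))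
      let cumu0 := (List.range rows).map (fun i => (List.range cols).map (fun j => if i = j then (1:Int) else 0))
      let res0 := (List.range rows).map (fun _ => (List.range cols).map (fun _ => (0:Int)))
      let fin := (PySem.List.pyRange 0 k 1).foldl (fun st _ =>
        let cumu := pyMulA m st.1 Amat rows cols cols
        (cumu, pyPlusA m st.2 cumu rows cols)) (cumu0, res0)
      fin.2

-- ===== PORT B =====
-- mul: entry = sum(X[i][t]*Y[t][j] for t in range(n)) % m   (one mod, after the whole sum)
def mulB (m : Int) (n : Nat) (X Y : List (List Int)) : List (List Int) :=
  (List.range n).map (fun i => (List.range n).map (fun j =>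
    PySem.Int.mod (((List.range n).map (fun t => (X.getD i []).getD t 0 * (Y.getD t []).getD j 0)).sum) m))

def addB (m : Int) (n : Nat) (X Y : List (List Int)) : List (List Int) :=
  (List.range n).map (fun i => (List.range n).map (fun j =>
    PySem.Int.mod ((X.getD i []).getD j 0 + (Y.getD i []).getD j 0) m))

-- series(t) = (A^t mod m, (A + ... + A^t) mod m), recursing on t // 2
def seriesB (m : Int) (n : Nat) (A : List (List Int)) (t : Int) : List (List Int) × List (List Int) :=
  if t ≤ 0 then
    ((List.range n).map (fun i => (List.range n).map (fun j => if i = j then (1:Int) else 0)),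
     (List.range n).map (fun _ => (List.range n).map (fun _ => (0:Int))))
  else
    let PS := seriesB m n A (PySem.Int.floordiv t 2)
    let P2 := mulB m n PS.1 PS.1
    let S2 := addB m n PS.2 (mulB m n PS.1 PS.2)
    if PySem.Int.mod t 2 = 1 then
      let Pt := mulB m n P2 A
      (Pt, addB m n S2 Pt)
    else (P2, S2)
termination_by t.toNat
decreasing_by
  rw [PySem.Int.floordiv_eq_ediv_of_pos (by omega : (0:Int) < 2)]
  omega

def matrixPowerSeries_alt (A : List (List Int)) (k : Int) (m : Int) : List (List Int) :=
  let n := A.length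
  if n = 0 ∨ (A.getD 0 []).length = 0 then []
  else (seriesB m A.length A k).2

-- ===== PRECONDITION & SPEC =====
-- Pre_ excludes: the empty matrix (A returns the int 0 there, not a matrix); inputs whose
-- effective shape is not square, i.e. len(A[0]) ≠ len(A) or some row shorter than len(A)
-- (the power series is only defined for square matrices: A raises IndexError there or
-- returns a value of a different shape than any square-matrix semantics, e.g. for a 2x1
-- input); and m = 0 with k ≥ 1 (ZeroDivisionError). Rows longer than len(A) are admitted:
-- both programs ignore the extra columns.
def Pre_matrixPowerSeries (A : List (List Int)) (k : Int) (m : Int) : Prop :=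
  A ≠ [] ∧ (A.getD 0 []).length = A.length ∧ (∀ row ∈ A, A.length ≤ row.length) ∧ (m ≠ 0 ∨ k ≤ 0)
instance (A : List (List Int)) (k : Int) (m : Int) : Decidable (Pre_matrixPowerSeries A k m) := by
  unfold Pre_matrixPowerSeries; infer_instance

def pvWitness_matrixPowerSeries : List (List Int) × Int × Int := ([[1, 2], [3, 4]], 3, 5)

def Spec_matrixPowerSeries (A : List (List Int)) (k : Int) (m : Int) (out : List (List Int)) : Prop := out = matrixPowerSeries_alt A k m
instance (A : List (List Int)) (k : Int) (m : Int) (out : List (List Int)) : Decidable (Spec_matrixPowerSeries A k m out) := by unfold Spec_matrixPowerSeries; infer_instance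

-- ===== CLAIM (what is proved, stated in full; the proofs are below) =====
def Claim_equal_matrixPowerSeries : Prop := ∀ (A : List (List Int)) (k : Int) (m : Int), Dom_matrixPowerSeries A k m → Pre_matrixPowerSeries A k m → Spec_matrixPowerSeries A k m (matrixPowerSeries A k m)

-- ===== LEMMAS AND PROOFS =====

-- entry access and matrix builder
def entry (X : List (List Int)) (i j : Nat) : Int := (X.getD i []).getD j 0

def Mk (n : Nat) (f : Nat → Nat → Int) : List (List Int) :=
  (List.range n).map (fun i => (List.range n).map (f i))

-- pure (un-reduced) matrix algebra on entry functions
def mulF (n : Nat) (f g : Nat → Nat → Int) : Nat → Nat → Int :=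
  fun i j => ∑ t ∈ Finset.range n, f i t * g t j

def addF (f g : Nat → Nat → Int) : Nat → Nat → Int := fun i j => f i j + g i j

def idF : Nat → Nat → Int := fun i j => if i = j then 1 else 0

def powF (n : Nat) (f : Nat → Nat → Int) : Nat → Nat → Nat → Int
  | 0 => idF
  | t + 1 => mulF n (powF n f t) f

def sF (n : Nat) (f : Nat → Nat → Int) : Nat → Nat → Nat → Int
  | 0 => fun _ _ => 0
  | t + 1 => addF (sF n f t) (powF n f (t + 1))

theorem entry_Mk {n : Nat} (f : Nat → Nat → Int) {i j : Nat} (hi : i < n) (hj : j < n) :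
    entry (Mk n f) i j = f i j := by
  simp [entry, Mk, List.getD_eq_getElem?_getD, hi, hj]

theorem Mk_congr {n : Nat} {f g : Nat → Nat → Int}
    (h : ∀ i < n, ∀ j < n, f i j = g i j) : Mk n f = Mk n g := by
  simp only [Mk]
  refine List.map_congr_left (fun i hi => ?_)
  exact List.map_congr_left (fun j hj => h i (List.mem_range.mp hi) j (List.mem_range.mp hj))

-- fmod lemmas
theorem pymod_modeq (a m : Int) : Int.fmod a m ≡ a [ZMOD m] := by
  have h := PySem.Int.floordiv_mul_add_mod a m
  simp only [PySem.Int.mod] at h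
  exact Int.modEq_iff_dvd.mpr ⟨PySem.Int.floordiv a m, by linarith⟩

theorem pymod_congr {m : Int} {a b : Int} (h : a ≡ b [ZMOD m]) :
    Int.fmod a m = Int.fmod b m := by
  by_cases hm : m = 0
  · subst hm
    have : a = b := by simpa [Int.ModEq] using h
    rw [this]
  have hc : Int.fmod a m ≡ Int.fmod b m [ZMOD m] :=
    (pymod_modeq a m).trans (h.trans (pymod_modeq b m).symm)
  have hd : |m| ∣ Int.fmod b m - Int.fmod a m := (abs_dvd _ _).mpr hc.dvd
  have habs : |Int.fmod b m - Int.fmod a m| < |m| := by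
    rcases lt_or_gt_of_ne hm with hneg | hpos
    · have b1 := PySem.Int.mod_neg_bounds a hneg
      have b2 := PySem.Int.mod_neg_bounds b hneg
      simp only [PySem.Int.mod] at b1 b2
      rw [abs_of_neg hneg]
      exact abs_lt.mpr ⟨by omega, by omega⟩
    · have b1 := PySem.Int.mod_nonneg a hpos
      have b2 := PySem.Int.mod_nonneg b hpos
      have c1 := PySem.Int.mod_lt a hpos
      have c2 := PySem.Int.mod_lt b hpos
      simp only [PySem.Int.mod] at b1 b2 c1 c2
      rw [abs_of_pos hpos]
      exact abs_lt.mpr ⟨by omega, by omega⟩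
  have := Int.eq_zero_of_abs_lt_dvd hd habs
  omega

-- stepwise mod-fold over a range equals one mod of the whole sum
theorem foldl_mod_range {m : Int} (h : Nat → Int) :
    ∀ (j : Nat) (a : Int),
      (List.range j).foldl (fun acc t => PySem.Int.mod (acc + h t) m) (Int.fmod a m)
        = Int.fmod (a + ∑ t ∈ Finset.range j, h t) m := by
  intro j
  induction j with
  | zero => intro a; simp
  | succ j ih =>
    intro a
    rw [List.range_succ, List.foldl_append, ih a]
    simp only [List.foldl, PySem.Int.mod]
    rw [Finset.sum_range_succ, ← add_assoc]
    exact pymod_congr ((pymod_modeq _ m).add_right (h j))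

theorem foldl_mod_range0 {m : Int} (h : Nat → Int) (j : Nat) :
    (List.range j).foldl (fun acc t => PySem.Int.mod (acc + h t) m) 0
      = Int.fmod (∑ t ∈ Finset.range j, h t) m := by
  have := foldl_mod_range (m := m) h j 0
  rw [Int.zero_fmod, zero_add] at this
  exact this

theorem sum_map_range (h : Nat → Int) (n : Nat) :
    ((List.range n).map h).sum = ∑ t ∈ Finset.range n, h t := by
  induction n with
  | zero => simp
  | succ n ih =>
    rw [List.range_succ, List.map_append, List.sum_append, Finset.sum_range_succ, ih]
    simp

-- characterisations of the matrix operations of the two ports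
theorem pyMulA_eq {m : Int} (X Y : List (List Int)) (n : Nat) :
    pyMulA m X Y n n n = Mk n (fun i j => Int.fmod (mulF n (entry X) (entry Y) i j) m) := by
  unfold pyMulA Mk
  refine List.map_congr_left (fun i _ => ?_)
  refine List.map_congr_left (fun j _ => ?_)
  simpa [mulF, entry] using
    foldl_mod_range0 (m := m) (fun t => (X.getD i []).getD t 0 * (Y.getD t []).getD j 0) n

theorem mulB_eq {m : Int} (n : Nat) (X Y : List (List Int)) :
    mulB m n X Y = Mk n (fun i j => Int.fmod (mulF n (entry X) (entry Y) i j) m) := by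
  unfold mulB Mk
  refine List.map_congr_left (fun i _ => ?_)
  refine List.map_congr_left (fun j _ => ?_)
  rw [sum_map_range]
  simp [mulF, entry, PySem.Int.mod]

theorem pyPlusA_eq {m : Int} (X Y : List (List Int)) (n : Nat) :
    pyPlusA m X Y n n = Mk n (fun i j => Int.fmod (addF (entry X) (entry Y) i j) m) := by
  simp [pyPlusA, Mk, addF, entry, PySem.Int.mod]

theorem addB_eq {m : Int} (n : Nat) (X Y : List (List Int)) :
    addB m n X Y = Mk n (fun i j => Int.fmod (addF (entry X) (entry Y) i j) m) := by
  simp [addB, Mk, addF, entry, PySem.Int.mod]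

-- congruence of sums and of mulF
theorem sum_modeq {m : Int} {n : Nat} {u v : Nat → Int}
    (h : ∀ t < n, u t ≡ v t [ZMOD m]) :
    (∑ t ∈ Finset.range n, u t) ≡ (∑ t ∈ Finset.range n, v t) [ZMOD m] := by
  induction n with
  | zero => rfl
  | succ n ih =>
    rw [Finset.sum_range_succ, Finset.sum_range_succ]
    exact (ih (fun t ht => h t (by omega))).add (h n (by omega))

theorem mulF_cong {m : Int} {n : Nat} {f f' g g' : Nat → Nat → Int}
    (hf : ∀ i < n, ∀ j < n, f i j ≡ f' i j [ZMOD m])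
    (hg : ∀ i < n, ∀ j < n, g i j ≡ g' i j [ZMOD m]) :
    ∀ i < n, ∀ j < n, mulF n f g i j ≡ mulF n f' g' i j [ZMOD m] := by
  intro i hi j hj
  exact sum_modeq (fun t ht => (hf i hi t ht).mul (hg t ht j hj))

-- algebraic identities (on the n × n block)
theorem mulF_idF_right {n : Nat} (f : Nat → Nat → Int) :
    ∀ i, ∀ j < n, mulF n f idF i j = f i j := by
  intro i j hj
  simp [mulF, idF, mul_ite, Finset.sum_ite_eq', Finset.mem_range, hj]

theorem mulF_assoc {n : Nat} (f g h : Nat → Nat → Int) (i j : Nat) :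
    mulF n (mulF n f g) h i j = mulF n f (mulF n g h) i j := by
  simp only [mulF, Finset.sum_mul, Finset.mul_sum]
  rw [Finset.sum_comm]
  exact Finset.sum_congr rfl (fun t _ => Finset.sum_congr rfl (fun s _ => by ring))

theorem mulF_addF_left {n : Nat} (f g h : Nat → Nat → Int) (i j : Nat) :
    mulF n f (addF g h) i j = addF (mulF n f g) (mulF n f h) i j := by
  simp [mulF, addF, mul_add, Finset.sum_add_distrib]

theorem mulF_block_congr {n : Nat} {f f' : Nat → Nat → Int} (g : Nat → Nat → Int)
    (hf : ∀ i < n, ∀ j < n, f i j = f' i j) :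
    ∀ i < n, ∀ j < n, mulF n f g i j = mulF n f' g i j := by
  intro i hi j hj
  exact Finset.sum_congr rfl (fun t ht => by rw [hf i hi t (Finset.mem_range.mp ht)])

theorem powF_add {n : Nat} (f : Nat → Nat → Int) (a b : Nat) :
    ∀ i < n, ∀ j < n, powF n f (a + b) i j = mulF n (powF n f a) (powF n f b) i j := by
  induction b with
  | zero =>
    intro i hi j hj
    simpa [powF] using (mulF_idF_right (powF n f a) i j hj).symm
  | succ b ih =>
    intro i hi j hj
    have e1 : a + (b + 1) = (a + b) + 1 := by omega
    rw [e1]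
    show mulF n (powF n f (a + b)) f i j = mulF n (powF n f a) (powF n f (b + 1)) i j
    calc mulF n (powF n f (a + b)) f i j
        = mulF n (mulF n (powF n f a) (powF n f b)) f i j :=
          mulF_block_congr f (fun i hi j hj => ih i hi j hj) i hi j hj
      _ = mulF n (powF n f a) (mulF n (powF n f b) f) i j := mulF_assoc _ _ _ i j
      _ = mulF n (powF n f a) (powF n f (b + 1)) i j := rfl

theorem sF_add {n : Nat} (f : Nat → Nat → Int) (a b : Nat) :
    ∀ i < n, ∀ j < n,
      sF n f (a + b) i j = sF n f a i j + mulF n (powF n f a) (sF n f b) i j := by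
  induction b with
  | zero =>
    intro i hi j hj
    simp [sF, mulF]
  | succ b ih =>
    intro i hi j hj
    have e1 : a + (b + 1) = (a + b) + 1 := by omega
    rw [e1]
    show sF n f (a + b) i j + powF n f ((a + b) + 1) i j
        = sF n f a i j + mulF n (powF n f a) (sF n f (b + 1)) i j
    rw [ih i hi j hj]
    have hp : powF n f ((a + b) + 1) i j = mulF n (powF n f a) (powF n f (b + 1)) i j := by
      rw [← e1]; exact powF_add f a (b + 1) i hi j hj
    rw [hp]
    have hs : mulF n (powF n f a) (sF n f (b + 1)) i j
        = mulF n (powF n f a) (sF n f b) i j + mulF n (powF n f a) (powF n f (b + 1)) i j := by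
      show mulF n (powF n f a) (addF (sF n f b) (powF n f (b + 1))) i j = _
      rw [mulF_addF_left]; rfl
    rw [hs]; ring

-- the base (t ≤ 0) branch of seriesB
theorem seriesB_base {m : Int} {n : Nat} {A : List (List Int)} {t : Int} (h0 : t ≤ 0) :
    (∀ i < n, ∀ j < n, entry (seriesB m n A t).1 i j ≡ powF n (entry A) t.toNat i j [ZMOD m]) ∧
    (seriesB m n A t).2 = Mk n (fun i j => Int.fmod (sF n (entry A) t.toNat i j) m) := by
  rw [seriesB, if_pos h0]
  have ht : t.toNat = 0 := by omega
  constructor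
  · intro i hi j hj
    rw [ht]
    show entry (Mk n idF) i j ≡ powF n (entry A) 0 i j [ZMOD m]
    rw [entry_Mk idF hi hj]
    rfl
  · rw [ht]
    show Mk n (fun _ _ => (0 : Int)) = Mk n (fun i j => Int.fmod (sF n (entry A) 0 i j) m)
    exact Mk_congr (fun i _ j _ => by simp [sF, Int.zero_fmod])

-- B invariant: seriesB returns (A^t mod m up to congruence, exactly (A + … + A^t) mod m)
theorem seriesB_spec (m : Int) (n : Nat) (A : List (List Int)) (t : Int) :
    (∀ i < n, ∀ j < n, entry (seriesB m n A t).1 i j ≡ powF n (entry A) t.toNat i j [ZMOD m]) ∧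
    (seriesB m n A t).2 = Mk n (fun i j => Int.fmod (sF n (entry A) t.toNat i j) m) := by
  have main : ∀ (N : Nat) (t : Int), t.toNat ≤ N →
      (∀ i < n, ∀ j < n, entry (seriesB m n A t).1 i j ≡ powF n (entry A) t.toNat i j [ZMOD m]) ∧
      (seriesB m n A t).2 = Mk n (fun i j => Int.fmod (sF n (entry A) t.toNat i j) m) := by
    intro N
    induction N with
    | zero => intro t ht; exact seriesB_base (by omega)
    | succ N ih =>
      intro t ht
      by_cases h0 : t ≤ 0
      · exact seriesB_base h0
      · have hpos : 0 < t := by omega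
        have hq2 : PySem.Int.floordiv t 2 = t / 2 :=
          PySem.Int.floordiv_eq_ediv_of_pos (by omega)
        have hm2 : PySem.Int.mod t 2 = t % 2 :=
          PySem.Int.mod_eq_emod_of_pos (by omega)
        obtain ⟨ihP, ihS⟩ := ih (PySem.Int.floordiv t 2) (by rw [hq2]; omega)
        set q : Nat := (PySem.Int.floordiv t 2).toNat with hqdef
        have hqn : q = t.toNat / 2 := by rw [hqdef, hq2]; omega
        rw [seriesB, if_neg h0]
        set PS := seriesB m n A (PySem.Int.floordiv t 2) with hPS
        have hP2 : ∀ i < n, ∀ j < n,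
            entry (mulB m n PS.1 PS.1) i j ≡ powF n (entry A) (q + q) i j [ZMOD m] := by
          intro i hi j hj
          rw [mulB_eq, entry_Mk _ hi hj]
          refine (pymod_modeq _ m).trans ?_
          refine (mulF_cong ihP ihP i hi j hj).trans ?_
          rw [powF_add (entry A) q q i hi j hj]
        have hS2 : addB m n PS.2 (mulB m n PS.1 PS.2)
            = Mk n (fun i j => Int.fmod (sF n (entry A) (q + q) i j) m) := by
          rw [addB_eq]
          refine Mk_congr (fun i hi j hj => ?_)
          have e2 : ∀ i < n, ∀ j < n, entry PS.2 i j ≡ sF n (entry A) q i j [ZMOD m] := by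
            intro i hi j hj
            rw [ihS, entry_Mk _ hi hj]
            exact pymod_modeq _ m
          have emul : entry (mulB m n PS.1 PS.2) i j
              ≡ mulF n (powF n (entry A) q) (sF n (entry A) q) i j [ZMOD m] := by
            rw [mulB_eq, entry_Mk _ hi hj]
            exact (pymod_modeq _ m).trans (mulF_cong ihP e2 i hi j hj)
          refine pymod_congr (((e2 i hi j hj).add emul).trans ?_)
          rw [← sF_add (entry A) q q i hi j hj]
        by_cases hodd : PySem.Int.mod t 2 = 1
        · rw [if_pos hodd]
          have htn : t.toNat = (q + q) + 1 := by
            rw [hqn]; rw [hm2] at hodd; omega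
          have hPt : mulB m n (mulB m n PS.1 PS.1) A
              = Mk n (fun i j => Int.fmod (powF n (entry A) ((q + q) + 1) i j) m) := by
            rw [mulB_eq (X := mulB m n PS.1 PS.1)]
            refine Mk_congr (fun i hi j hj => ?_)
            refine pymod_congr ?_
            show mulF n (entry (mulB m n PS.1 PS.1)) (entry A) i j
                ≡ mulF n (powF n (entry A) (q + q)) (entry A) i j [ZMOD m]
            exact mulF_cong hP2 (fun i hi j hj => Int.ModEq.refl _) i hi j hj
          constructor
          · intro i hi j hj
            show entry (mulB m n (mulB m n PS.1 PS.1) A) i j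
                ≡ powF n (entry A) t.toNat i j [ZMOD m]
            rw [hPt, entry_Mk _ hi hj, htn]
            exact pymod_modeq _ m
          · show addB m n (addB m n PS.2 (mulB m n PS.1 PS.2))
                (mulB m n (mulB m n PS.1 PS.1) A)
              = Mk n (fun i j => Int.fmod (sF n (entry A) t.toNat i j) m)
            rw [addB_eq, hS2, hPt, htn]
            refine Mk_congr (fun i hi j hj => ?_)
            simp only [addF]
            rw [entry_Mk _ hi hj, entry_Mk _ hi hj]
            exact pymod_congr ((pymod_modeq _ m).add (pymod_modeq _ m))
        · rw [if_neg hodd]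
          have htn : t.toNat = q + q := by
            rw [hqn]; rw [hm2] at hodd
            have h1 : 0 ≤ t % 2 := Int.emod_nonneg t (by omega)
            have h2 : t % 2 < 2 := Int.emod_lt_of_pos t (by omega)
            omega
          exact ⟨by rw [htn]; exact hP2, by rw [htn]; exact hS2⟩
  exact main t.toNat t le_rfl

-- A invariant: after K loop iterations, cumu ≡ A^K and result = (A + … + A^K) mod m exactly
theorem loopA_spec (m : Int) (n : Nat) (A : List (List Int)) (K : Nat) :
    (∀ i < n, ∀ j < n,
      entry ((List.range K).foldl (fun st (_ : Nat) =>
        (pyMulA m st.1 (Mk n (entry A)) n n n,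
         pyPlusA m st.2 (pyMulA m st.1 (Mk n (entry A)) n n n) n n))
        (Mk n idF, Mk n (fun _ _ => 0))).1 i j ≡ powF n (entry A) K i j [ZMOD m]) ∧
    ((List.range K).foldl (fun st (_ : Nat) =>
        (pyMulA m st.1 (Mk n (entry A)) n n n,
         pyPlusA m st.2 (pyMulA m st.1 (Mk n (entry A)) n n n) n n))
      (Mk n idF, Mk n (fun _ _ => 0))).2
      = Mk n (fun i j => Int.fmod (sF n (entry A) K i j) m) := by
  induction K with
  | zero =>
    constructor
    · intro i hi j hj
      simp only [List.range_zero, List.foldl_nil]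
      rw [entry_Mk _ hi hj]
      rfl
    · simp only [List.range_zero, List.foldl_nil]
      exact Mk_congr (fun i _ j _ => by simp [sF, Int.zero_fmod])
  | succ K ih =>
    obtain ⟨ihP, ihS⟩ := ih
    rw [List.range_succ, List.foldl_append]
    simp only [List.foldl]
    set st := (List.range K).foldl (fun st (_ : Nat) =>
        (pyMulA m st.1 (Mk n (entry A)) n n n,
         pyPlusA m st.2 (pyMulA m st.1 (Mk n (entry A)) n n n) n n))
      (Mk n idF, Mk n (fun _ _ => 0)) with hst
    have hcumu : ∀ i < n, ∀ j < n,
        entry (pyMulA m st.1 (Mk n (entry A)) n n n) i j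
          ≡ powF n (entry A) (K + 1) i j [ZMOD m] := by
      intro i hi j hj
      rw [pyMulA_eq, entry_Mk _ hi hj]
      refine (pymod_modeq _ m).trans ?_
      show mulF n (entry st.1) (entry (Mk n (entry A))) i j
          ≡ mulF n (powF n (entry A) K) (entry A) i j [ZMOD m]
      exact mulF_cong ihP
        (fun i hi j hj => by rw [entry_Mk _ hi hj]) i hi j hj
    constructor
    · exact hcumu
    · rw [pyPlusA_eq, ihS]
      refine Mk_congr (fun i hi j hj => ?_)
      simp only [addF]
      rw [entry_Mk _ hi hj]
      exact pymod_congr ((pymod_modeq _ m).add (hcumu i hi j hj))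

-- ===== VERDICT (by name: the statement is the Claim_ definition above) =====
theorem matrixPowerSeries_spec : Claim_equal_matrixPowerSeries := by
  intro A k m hdom hpre
  obtain ⟨hne, hc0, -, -⟩ := hpre
  obtain ⟨a, l, rfl⟩ : ∃ a l, A = a :: l := by
    cases A with
    | nil => exact absurd rfl hne
    | cons a l => exact ⟨a, l, rfl⟩
  set A := a :: l with hA
  set n := A.length with hn
  have hnpos : 0 < n := by rw [hn, hA]; simp
  have hcols : (A.getD 0 []).length = n := hc0
  show matrixPowerSeries A k m = matrixPowerSeries_alt A k m
  have hB : matrixPowerSeries_alt A k m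
      = Mk n (fun i j => Int.fmod (sF n (entry A) k.toNat i j) m) := by
    rw [matrixPowerSeries_alt]
    simp only [← hn, hcols]
    rw [if_neg (by omega)]
    exact (seriesB_spec m n A k).2
  have hAloop : matrixPowerSeries A k m
      = Mk n (fun i j => Int.fmod (sF n (entry A) k.toNat i j) m) := by
    rw [matrixPowerSeries]
    simp only [← hn, hcols]
    rw [if_neg (by omega), if_neg (by omega)]
    rw [PySem.List.pyRange_one, List.foldl_map]
    have e0 : (k - 0).toNat = k.toNat := by omega
    rw [e0]
    exact (loopA_spec m n A k.toNat).2
  rw [hB, hAloop]
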